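-- pv_equiv track=rewrite | github.com/B2SIC/CodeStorage | 프로그래머스/고득점 Kit/힙(Heap)/더 맵게.py | solution
-- ===== SOURCE A (Python) =====
-- from heapq import heappush, heappop, heapify
--
-- def solution(scoville, K):
--     answer = 0
--
--     heapify(scoville)
--
--     while True:
--         s1 = heappop(scoville)
--         if s1 >= K:
--             break
--
--         if not scoville:
--             answer = -1
--             break
--         s2 = heappop(scoville)
--
--         heappush(scoville, s1 + (s2 * 2))
--         answer += 1
--
--     return answer
-- ===== SOURCE B (Python) =====
-- def solution(scoville, K):
--     # repeated linear min-scan over a plain list instead of a heap;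
--     # works on a copy (does not mutate the caller's list, unlike A which heapifies/pops it in place)
--     foods = list(scoville)
--     answer = 0
--     while True:
--         s1 = min(foods)
--         foods.pop(foods.index(s1))
--         if s1 >= K:
--             return answer
--         if not foods:
--             return -1
--         s2 = min(foods)
--         foods.pop(foods.index(s2))
--         foods.append(s1 + s2 * 2)
--         answer += 1
-- ===== Notes on version B (the rewrite author's own statement) =====
-- stated objective: alternative
-- what changed: Replaces the heapq priority queue with a plain list processed by repeated linear min-scans (min + index + pop, append the mix at the end), working on a copy instead of mutating the argument.
import Mathlib
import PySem

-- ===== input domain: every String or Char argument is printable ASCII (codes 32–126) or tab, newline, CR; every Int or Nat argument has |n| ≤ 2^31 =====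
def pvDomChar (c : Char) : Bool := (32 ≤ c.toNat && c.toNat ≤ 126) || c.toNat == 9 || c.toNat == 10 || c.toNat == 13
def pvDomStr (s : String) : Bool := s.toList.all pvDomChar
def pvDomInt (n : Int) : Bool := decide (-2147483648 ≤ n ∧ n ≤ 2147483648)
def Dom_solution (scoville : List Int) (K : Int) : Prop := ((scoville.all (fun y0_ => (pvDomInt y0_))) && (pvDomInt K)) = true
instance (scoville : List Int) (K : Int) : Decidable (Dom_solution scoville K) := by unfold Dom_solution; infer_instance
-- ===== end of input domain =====

-- B replaces A's heapq priority queue by repeated linear min-scans over a plain list (alternative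
-- data structure, same cost class for the proof; A additionally mutates its argument in place —
-- the equivalence proved here is about the RETURN value only, B works on a copy).

-- ===== PORT A =====
-- heapq is modelled as a sorted list: heapify = insertionSort, heappop = take the head,
-- heappush = orderedInsert; this is exact for the VALUES heappop returns (always the minimum).
def insSort (x : Int) (l : List Int) : List Int := List.orderedInsert (· ≤ ·) x l

def heapifyL (l : List Int) : List Int := List.insertionSort (· ≤ ·) l

-- the `while True` loop; fuel = |scoville| + 1 strictly bounds the number of iterations
-- (each iteration shortens the heap by one).  heap = [] at loop head is Python's IndexError,
-- reachable only on empty input, which Pre_solution excludes.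
def loopA : Nat → List Int → Int → Int → Int
  | 0, _, _, ans => ans
  | n + 1, heap, K, ans =>
    match heap with
    | [] => ans
    | s1 :: rest =>
      if s1 ≥ K then ans
      else
        match rest with
        | [] => -1
        | s2 :: rest2 => loopA n (insSort (s1 + s2 * 2) rest2) K (ans + 1)

def solution (scoville : List Int) (K : Int) : Int :=
  loopA (scoville.length + 1) (heapifyL scoville) K 0

-- ===== PORT B =====
-- min(foods) scanned Python-style (first element, replace when strictly smaller);
-- foods.pop(foods.index(s)) = erase the first occurrence of s.
def minScan : List Int → Int
  | [] => 0   -- min([]) raises in Python; reachable only on empty input, excluded by Pre_solution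
  | x :: xs => xs.foldl (fun m b => if b < m then b else m) x

def loopB : Nat → List Int → Int → Int → Int
  | 0, _, _, ans => ans
  | n + 1, foods, K, ans =>
    let s1 := minScan foods
    let foods1 := foods.erase s1
    if s1 ≥ K then ans
    else if foods1.isEmpty then -1
    else
      let s2 := minScan foods1
      loopB n ((foods1.erase s2) ++ [s1 + s2 * 2]) K (ans + 1)

def solution_alt (scoville : List Int) (K : Int) : Int :=
  loopB (scoville.length + 1) scoville K 0

-- ===== PRECONDITION & SPEC =====
-- A raises IndexError (heappop of an empty heap) on the empty list; B raises ValueError there.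
def Pre_solution (scoville : List Int) (K : Int) : Prop := scoville ≠ []
instance (scoville : List Int) (K : Int) : Decidable (Pre_solution scoville K) := by
  unfold Pre_solution; infer_instance

def pvWitness_solution : List Int × Int := ([1, 2, 3, 9, 10, 12], 7)

def Spec_solution (scoville : List Int) (K : Int) (out : Int) : Prop := out = solution_alt scoville K
instance (scoville : List Int) (K : Int) (out : Int) : Decidable (Spec_solution scoville K out) := by
  unfold Spec_solution; infer_instance

-- ===== CLAIM (what is proved, stated in full; the proofs are below) =====
def Claim_equal_solution : Prop := ∀ (scoville : List Int) (K : Int), Dom_solution scoville K → Pre_solution scoville K → Spec_solution scoville K (solution scoville K)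

-- ===== LEMMAS AND PROOFS =====

theorem heapify_perm (l : List Int) : List.Perm (heapifyL l) l :=
  List.perm_insertionSort _ l

theorem heapify_pairwise (l : List Int) : List.Pairwise (· ≤ ·) (heapifyL l) :=
  List.pairwise_insertionSort _ l

-- canonicity: any sorted permutation of l IS heapifyL l
theorem eq_heapify_of_perm_of_pairwise {m l : List Int} (hp : List.Perm m l)
    (hs : List.Pairwise (· ≤ ·) m) : m = heapifyL l :=
  List.Perm.eq_of_pairwise' hs (heapify_pairwise l) (hp.trans (heapify_perm l).symm)

theorem minScan_spec (x : Int) (xs : List Int) :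
    minScan (x :: xs) ∈ x :: xs ∧ ∀ y ∈ x :: xs, minScan (x :: xs) ≤ y := by
  induction xs generalizing x with
  | nil => simp [minScan]
  | cons b xs ih =>
    have key : minScan (x :: b :: xs) = minScan ((if b < x then b else x) :: xs) := by
      simp [minScan]
    rcases ih (if b < x then b else x) with ⟨hmem, hle⟩
    rw [key]
    have hx : minScan ((if b < x then b else x) :: xs) ≤ if b < x then b else x :=
      hle _ (List.mem_cons_self ..)
    refine ⟨?_, ?_⟩
    · rcases List.mem_cons.mp hmem with h | h
      · rw [h]; split_ifs
        · exact List.mem_cons_of_mem _ (List.mem_cons_self ..)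
        · exact List.mem_cons_self ..
      · exact List.mem_cons_of_mem _ (List.mem_cons_of_mem _ h)
    · intro y hy
      have hvx : (if b < x then b else x) ≤ x := by split_ifs <;> omega
      have hvb : (if b < x then b else x) ≤ b := by split_ifs <;> omega
      rcases List.mem_cons.mp hy with rfl | hy
      · omega
      · rcases List.mem_cons.mp hy with rfl | hy
        · omega
        · exact hle y (List.mem_cons_of_mem _ hy)

-- head/tail of the sorted model: the head is min(l) and the tail models l with that
-- first occurrence removed
theorem heapify_head_tail {l : List Int} {s1 : Int} {rest : List Int}
    (h : heapifyL l = s1 :: rest) :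
    s1 = minScan l ∧ rest = heapifyL (l.erase s1) := by
  have hperm : List.Perm (s1 :: rest) l := h ▸ heapify_perm l
  have hpw : List.Pairwise (· ≤ ·) (s1 :: rest) := h ▸ heapify_pairwise l
  obtain ⟨x, xs, rfl⟩ : ∃ x xs, l = x :: xs := by
    cases l with
    | nil => simp [heapifyL, List.insertionSort] at h
    | cons x xs => exact ⟨x, xs, rfl⟩
  have hm := minScan_spec x xs
  have hs1 : s1 = minScan (x :: xs) := by
    have h1 : s1 ≤ minScan (x :: xs) := by
      have hmem : minScan (x :: xs) ∈ s1 :: rest := hperm.symm.subset hm.1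
      rcases List.mem_cons.mp hmem with h' | h'
      · omega
      · exact List.rel_of_pairwise_cons hpw h'
    have h2 : minScan (x :: xs) ≤ s1 := hm.2 s1 (hperm.subset (List.mem_cons_self ..))
    omega
  refine ⟨hs1, ?_⟩
  apply eq_heapify_of_perm_of_pairwise
  · have hp2 := hperm.erase s1
    simpa using hp2
  · exact hpw.of_cons

-- pushing onto the sorted model = the model of the list with the value appended
theorem insSort_heapify (v : Int) (l : List Int) :
    insSort v (heapifyL l) = heapifyL (l ++ [v]) := by
  apply eq_heapify_of_perm_of_pairwise
  · refine ((List.perm_orderedInsert _ v (heapifyL l)).trans ((heapify_perm l).cons v)).trans ?_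
    simpa using List.perm_append_comm (l₁ := [v]) (l₂ := l)
  · exact (heapify_pairwise l).orderedInsert v _

theorem heapify_nil_iff (l : List Int) : heapifyL l = [] ↔ l = [] := by
  constructor
  · intro h
    have := (heapify_perm l).length_eq
    rw [h] at this
    exact List.length_eq_zero_iff.mp this.symm
  · rintro rfl; rfl

theorem loop_eq (n : Nat) : ∀ (l : List Int) (K ans : Int), l ≠ [] →
    loopA n (heapifyL l) K ans = loopB n l K ans := by
  induction n with
  | zero => intro l K ans _; rfl
  | succ n ih =>
    intro l K ans hne
    cases hh : heapifyL l with
    | nil => exact absurd ((heapify_nil_iff l).mp hh) hne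
    | cons s1 rest =>
      obtain ⟨hs1, hrest⟩ := heapify_head_tail hh
      simp only [loopA, loopB, ← hs1]
      by_cases hK : s1 ≥ K
      · simp [hK]
      · simp only [hK, if_false]
        cases hr : rest with
        | nil =>
          have : l.erase s1 = [] := (heapify_nil_iff _).mp (hr ▸ hrest.symm)
          simp [this]
        | cons s2 rest2 =>
          have h2 := heapify_head_tail (l := l.erase s1) (hrest ▸ hr)
          have hempty : (l.erase s1).isEmpty = false := by
            cases h0 : l.erase s1 with
            | nil => rw [h0] at hrest; rw [hr] at hrest
                     simp [heapifyL, List.insertionSort] at hrest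
            | cons _ _ => rfl
          simp only [hempty, Bool.false_eq_true, if_false, ← h2.1]
          rw [← ih ((l.erase s1).erase s2 ++ [s1 + s2 * 2]) K (ans + 1) (by simp),
              ← insSort_heapify, ← h2.2]

-- ===== VERDICT (by name: the statement is the Claim_ definition above) =====
theorem solution_spec : Claim_equal_solution := by
  intro scoville K _ hpre
  unfold Spec_solution solution solution_alt
  exact loop_eq (scoville.length + 1) scoville K 0 hpre
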